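-- pv_equiv track=rewrite | github.com/dusterbloom/localcat | server/memory_hotpath.py | _strip_leading_dets
-- ===== SOURCE A (Python) =====
-- def _norm(text: str) -> str:
--     """Fast normalization"""
--     return text.lower().strip() if text else ""
--
-- _DET_WORDS = {
--     "the", "a", "an",
--     "my", "your", "his", "her", "their", "our", "its"
-- }
--
-- def _strip_leading_dets(text: str) -> str:
--     t = _norm(text)
--     # Remove leading possessives/determiners
--     for det in list(_DET_WORDS):
--         if t.startswith(det + " "):
--             t = t[len(det) + 1 :]
--             break
--     # Remove trailing possessive suffix "'s"
--     if t.endswith("'s"):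
--         t = t[:-2]
--     return t.strip()
-- ===== SOURCE B (Python) =====
-- def _norm(text: str) -> str:
--     """Fast normalization"""
--     return text.lower().strip() if text else ""
--
-- _DET_WORDS = {
--     "the", "a", "an",
--     "my", "your", "his", "her", "their", "our", "its"
-- }
--
-- def _strip_leading_dets(text: str) -> str:
--     t = _norm(text)
--     # Locate the first word boundary once; strip it if the first word is a determiner
--     i = t.find(' ')
--     if i != -1 and t[:i] in _DET_WORDS:
--         t = t[i + 1:]
--     # Remove trailing possessive suffix "'s"
--     if t.endswith("'s"):
--         t = t[:-2]
--     return t.strip()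
-- ===== Notes on version B (the rewrite author's own statement) =====
-- stated objective: idiomatic
-- what changed: B locates the first word boundary once with str.find and does a single set-membership test on the first word, instead of A's loop over all ten determiners with a startswith prefix test per determiner.
import Mathlib
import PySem

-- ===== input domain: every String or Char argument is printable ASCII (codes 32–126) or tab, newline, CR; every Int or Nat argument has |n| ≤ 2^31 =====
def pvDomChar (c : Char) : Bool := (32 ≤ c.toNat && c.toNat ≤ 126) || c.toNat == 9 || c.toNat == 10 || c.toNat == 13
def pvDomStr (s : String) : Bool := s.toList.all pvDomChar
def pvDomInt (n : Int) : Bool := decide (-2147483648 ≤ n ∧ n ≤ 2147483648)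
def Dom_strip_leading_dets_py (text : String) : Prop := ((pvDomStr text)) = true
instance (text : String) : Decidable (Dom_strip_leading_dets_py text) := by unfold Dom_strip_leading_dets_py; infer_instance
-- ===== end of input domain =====

-- B replaces A's loop of startswith tests over every determiner by one t.find(' ') scan
-- plus a single set-membership test on the first word (objective: idiomatic).

-- shared module context: _norm and _DET_WORDS
def pvNorm (text : String) : String :=
  if text = "" then "" else PySem.Str.strip (PySem.Str.lower text)

def pvDets : List String :=
  ["the", "a", "an", "my", "your", "his", "her", "their", "our", "its"]

-- ===== PORT A =====
-- the 'for det in list(_DET_WORDS)' loop with break (the result does not depend on the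
-- set's iteration order: at most one determiner can match, since none contains a space)
def pvDetLoop : List String → String → String
  | [], t => t
  | det :: rest, t =>
    if PySem.Str.startswith t (det ++ " ") then
      PySem.Str.slice t (some (PySem.Str.len det + 1)) none
    else pvDetLoop rest t

def strip_leading_dets_py (text : String) : String :=
  let t := pvNorm text
  let t := pvDetLoop pvDets t
  let t := if PySem.Str.endswith t "'s" then PySem.Str.slice t none (some (-2)) else t
  PySem.Str.strip t

-- ===== PORT B =====
def pvDetSet : PySem.Set String := PySem.Set.ofList pvDets

def strip_leading_dets_py_alt (text : String) : String :=
  let t := pvNorm text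
  let i := PySem.Str.find t " "
  let t := if i ≠ -1 ∧ PySem.Set.contains pvDetSet (PySem.Str.slice t none (some i)) = true then
      PySem.Str.slice t (some (i + 1)) none
    else t
  let t := if PySem.Str.endswith t "'s" then PySem.Str.slice t none (some (-2)) else t
  PySem.Str.strip t

-- ===== PRECONDITION & SPEC =====
def Spec_strip_leading_dets_py (text : String) (out : String) : Prop := out = strip_leading_dets_py_alt text
instance (text : String) (out : String) : Decidable (Spec_strip_leading_dets_py text out) := by unfold Spec_strip_leading_dets_py; infer_instance

-- ===== CLAIM (what is proved, stated in full; the proofs are below) =====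
def Claim_equal_strip_leading_dets_py : Prop := ∀ (text : String), Dom_strip_leading_dets_py text → Spec_strip_leading_dets_py text (strip_leading_dets_py text)

-- ===== LEMMAS AND PROOFS =====

-- find.go on a single-char needle: index of the first space, offset by k
theorem pv_find_go_spec (l : List Char) (k : Nat) :
    PySem.Chars.find.go [' '] l k =
      if (' ' : Char) ∈ l then ((k : Int) + (l.takeWhile (fun c => c != ' ')).length) else -1 := by
  induction l generalizing k with
  | nil => simp [PySem.Chars.find.go]
  | cons h t ih =>
    by_cases hh : h = ' '
    · subst hh
      simp [PySem.Chars.find.go, List.isPrefixOf]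
    · have hpre : ¬ (List.isPrefixOf [' '] (h :: t) = true) := by
        simp [List.isPrefixOf]
        intro hc; exact absurd hc.symm hh
      rw [PySem.Chars.find.go]
      simp only [hpre, if_neg]
      rw [ih (k + 1)]
      have hne : (h != ' ') = true := by simp [hh]
      by_cases hm : (' ' : Char) ∈ t
      · simp [hne, hm, List.mem_cons]
        omega
      · simp [hne, hm, List.mem_cons]
        intro hc
        exact absurd hc.symm hh

theorem pv_find_spec (l : List Char) :
    PySem.Chars.find l [' '] =
      if (' ' : Char) ∈ l then ((l.takeWhile (fun c => c != ' ')).length : Int) else -1 := by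
  have := pv_find_go_spec l 0
  simpa [PySem.Chars.find] using this

-- a determiner-with-space prefix is exactly: a space occurs, and the first word is that determiner
theorem pv_prefix_iff (d l : List Char) (hd : ∀ c ∈ d, c ≠ ' ') :
    (d ++ [' ']) <+: l ↔ ((' ' : Char) ∈ l ∧ l.takeWhile (fun c => c != ' ') = d) := by
  constructor
  · rintro ⟨r, hr⟩
    subst hr
    constructor
    · simp
    · have : ∀ c ∈ d, (fun c => c != ' ') c = true := by
        intro c hc; simpa using hd c hc
      rw [List.append_assoc, List.takeWhile_append_of_pos this]
      simp
  · rintro ⟨hmem, htw⟩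
    have hsplit := List.takeWhile_append_dropWhile (p := fun c => c != ' ') (l := l)
    have hdwne : l.dropWhile (fun c => c != ' ') ≠ [] := by
      intro hnil
      rw [hnil, List.append_nil] at hsplit
      rw [← hsplit] at hmem
      have := List.mem_takeWhile_imp hmem
      simp at this
    obtain ⟨c, r, hcr⟩ := List.exists_cons_of_ne_nil hdwne
    have hhead := List.head_dropWhile_not (p := fun c => c != ' ') (l := l) hdwne
    simp [hcr] at hhead
    refine ⟨r, ?_⟩
    rw [← hsplit, htw, hcr, hhead]
    simp

-- no determiner contains a space
theorem pv_dets_nospace : ∀ d ∈ pvDets, ∀ c ∈ d.toList, c ≠ ' ' := by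
  intro d hd c hc
  simp only [pvDets, List.mem_cons, List.not_mem_nil, or_false] at hd
  rcases hd with rfl|rfl|rfl|rfl|rfl|rfl|rfl|rfl|rfl|rfl <;>
    simp at hc <;>
    (first
      | (rcases hc with rfl|rfl|rfl|rfl|rfl)
      | (rcases hc with rfl|rfl|rfl|rfl)
      | (rcases hc with rfl|rfl|rfl)
      | (rcases hc with rfl|rfl)
      | subst hc) <;>
    decide

-- A's loop computes: if a space occurs and the first word is a determiner, drop it
theorem pv_loop_spec (ds : List String) (t : String)
    (hds : ∀ d ∈ ds, ∀ c ∈ d.toList, c ≠ ' ') :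
    pvDetLoop ds t =
      if ((' ' : Char) ∈ t.toList ∧
          String.ofList (t.toList.takeWhile (fun c => c != ' ')) ∈ ds) then
        PySem.Str.slice t (some (((t.toList.takeWhile (fun c => c != ' ')).length : Int) + 1)) none
      else t := by
  induction ds with
  | nil => simp [pvDetLoop]
  | cons d rest ih =>
    rw [pvDetLoop]
    have hiff := pv_prefix_iff d.toList t.toList (hds d (by simp))
    by_cases hp : PySem.Str.startswith t (d ++ " ") = true
    · rw [if_pos hp]
      have : (d.toList ++ [' ']) <+: t.toList := by
        rw [PySem.Str.startswith_eq] at hp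
        have := (PySem.Chars.startswith_iff _ _).mp hp
        simpa [String.toList_append] using this
      obtain ⟨hmem, htw⟩ := hiff.mp this
      rw [if_pos ⟨hmem, by rw [htw]; simp [String.ofList_toList]⟩]
      rw [htw]
      simp [PySem.Str.len]
    · rw [if_neg hp, ih (fun d hd => hds d (List.mem_cons_of_mem _ hd))]
      by_cases hc : ((' ' : Char) ∈ t.toList ∧
          String.ofList (t.toList.takeWhile (fun c => c != ' ')) ∈ rest)
      · rw [if_pos hc, if_pos ⟨hc.1, List.mem_cons_of_mem _ hc.2⟩]
      · rw [if_neg hc]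
        rw [if_neg]
        rintro ⟨hmem, hmem2⟩
        rcases List.mem_cons.mp hmem2 with h1 | h2
        · -- first word equals d, so the prefix test would have succeeded
          apply hp
          rw [PySem.Str.startswith_eq]
          apply (PySem.Chars.startswith_iff _ _).mpr
          have htw : t.toList.takeWhile (fun c => c != ' ') = d.toList := by
            have := congrArg String.toList h1
            simpa using this
          simpa [String.toList_append] using hiff.mpr ⟨hmem, htw⟩
        · exact hc ⟨hmem, h2⟩

-- B's split step equals A's loop
theorem pv_det_step_eq (t : String) :
    pvDetLoop pvDets t =
      (if PySem.Str.find t " " ≠ -1 ∧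
          PySem.Set.contains pvDetSet (PySem.Str.slice t none (some (PySem.Str.find t " "))) = true then
        PySem.Str.slice t (some (PySem.Str.find t " " + 1)) none
      else t) := by
  rw [pv_loop_spec pvDets t pv_dets_nospace]
  set l := t.toList with hl
  set w := l.takeWhile (fun c => c != ' ') with hw
  have hfind : PySem.Str.find t " " =
      if (' ' : Char) ∈ l then ((w.length : Nat) : Int) else -1 := by
    rw [PySem.Str.find]
    have : (" " : String).toList = [' '] := by decide
    rw [this, ← hl, pv_find_spec]
  by_cases hmem : (' ' : Char) ∈ l
  · rw [hfind, if_pos hmem]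
    have hwp : w <+: l := List.takeWhile_prefix _
    have hslice : PySem.Str.slice t none (some ((w.length : Nat) : Int)) = String.ofList w := by
      rw [PySem.Str.slice]
      congr 1
      show PySem.List.slice t.toList none (some ((w.length : Nat) : Int)) = w
      rw [PySem.List.slice_to _ (by exact_mod_cast Nat.zero_le w.length)]
      rw [Int.toNat_natCast, ← hl]
      exact (List.prefix_iff_eq_take.mp hwp).symm
    rw [hslice]
    have hcontains : PySem.Set.contains pvDetSet (String.ofList w) = true ↔
        String.ofList w ∈ pvDets := by
      rw [PySem.Set.contains_iff]
      unfold pvDetSet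
      exact PySem.Set.mem_ofList _ _
    by_cases hin : String.ofList w ∈ pvDets
    · rw [if_pos ⟨hmem, hin⟩, if_pos ⟨by simp, hcontains.mpr hin⟩]
    · rw [if_neg (fun h => hin h.2), if_neg (fun h => hin (hcontains.mp h.2))]
  · rw [hfind, if_neg hmem, if_neg (fun h => hmem h.1), if_neg (by simp)]

-- ===== VERDICT (by name: the statement is the Claim_ definition above) =====
theorem strip_leading_dets_py_spec : Claim_equal_strip_leading_dets_py := by
  intro text _
  unfold Spec_strip_leading_dets_py
  simp only [strip_leading_dets_py, strip_leading_dets_py_alt]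
  rw [pv_det_step_eq]
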